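-- pv_equiv track=rewrite | github.com/protocol7/advent-of-code | 2018/8/license2.py | parse_node
-- ===== SOURCE A (Python) =====
-- def parse_node(inp):
--     c_count = inp[0]
--     m_count = inp[1]
--
--     end_pos = 2
--     children = []
--     for c in range(c_count):
--         ep, v = parse_node(inp[end_pos:])
--         end_pos += ep
--         children.append(v)
--
--     metadata = inp[end_pos:end_pos + m_count]
--
--     value = 0
--     if children:
--         for m in metadata:
--             m -= 1
--             if m < len(children):
--                 value += children[m]
--     else:
--         value = sum(metadata)
--
--     end_pos += m_count
--
--     return (end_pos, value)
-- ===== SOURCE B (Python) =====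
-- def parse_node(inp):
--     # Iterative parser: one left-to-right pass with an explicit stack of open
--     # frames [child_count, meta_count, child_values] instead of A's recursion
--     # that copies a slice of the input for every node.
--     pos = 0
--     stack = []
--     while True:
--         c, m = inp[pos], inp[pos + 1]
--         pos += 2
--         stack.append([c, m, []])
--         while stack[-1][0] <= len(stack[-1][2]):
--             c, m, ch = stack.pop()
--             md = inp[pos:pos + m]
--             pos += m
--             if ch:
--                 v = sum(ch[x - 1] for x in md if x - 1 < len(ch))
--             else:
--                 v = sum(md)
--             if not stack:
--                 return (pos, v)
--             stack[-1][2].append(v)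
-- ===== Notes on version B (the rewrite author's own statement) =====
-- stated objective: alternative
-- what changed: B replaces A's recursion, which copies a slice of the input list for every recursive call, by a single left-to-right iterative pass over the shared buffer with an explicit stack of open frames [child_count, meta_count, child_values]; Pre_ excludes the inputs on which A raises and the malformed encodings (a positive child count not followed by complete well-formed records) where the two parsers' unspecified junk values legitimately diverge.
-- outside the precondition, e.g. on parse_node([2, 2, -3, -3, -3]): A returns (0, 0), B raises IndexError; on parse_node([1, 1, -3, -3, -3, -3]): A returns (2, -3), B returns (2, 0)
import Mathlib
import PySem

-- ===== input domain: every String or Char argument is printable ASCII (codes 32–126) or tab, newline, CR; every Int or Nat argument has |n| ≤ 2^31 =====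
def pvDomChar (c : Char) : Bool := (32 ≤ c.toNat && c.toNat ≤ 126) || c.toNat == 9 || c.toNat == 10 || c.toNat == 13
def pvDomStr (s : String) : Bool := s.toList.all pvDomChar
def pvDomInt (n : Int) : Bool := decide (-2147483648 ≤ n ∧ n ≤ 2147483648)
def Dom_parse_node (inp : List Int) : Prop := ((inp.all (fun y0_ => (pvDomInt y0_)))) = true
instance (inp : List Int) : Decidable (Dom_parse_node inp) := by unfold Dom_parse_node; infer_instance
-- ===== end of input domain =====

-- B replaces A's recursion (which copies a slice of the input for every node) by a single
-- left-to-right pass with an explicit stack of open frames; return values proved equal on Pre_.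

-- ===== PORT A =====
-- A's value loop: 'for m in metadata: m -= 1; if m < len(children): value += children[m]'
-- (none = IndexError from children[m], which Pre_ excludes)
def pAValue (children : List Int) : List Int → Int → Option Int
  | [], value => some value
  | m :: rest, value =>
    let m' := m - 1
    if m' < (children.length : Int) then
      match PySem.List.pyGet? children m' with
      | none => none
      | some x => pAValue children rest (value + x)
    else pAValue children rest value

mutual
-- parse_node(inp): fuel only makes the recursion total; none = a Python exception
def pA (fuel : Nat) (inp : List Int) : Option (Int × Int) :=
  match fuel with
  | 0 => none
  | f + 1 =>
    match PySem.List.pyGet? inp 0, PySem.List.pyGet? inp 1 with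
    | some c_count, some m_count =>
      -- 'for c in range(c_count): ep, v = parse_node(inp[end_pos:]); …'
      match pAChildren f inp c_count.toNat 2 [] with
      | none => none
      | some (endPos, children) =>
        let metadata := PySem.List.slice inp (some endPos) (some (endPos + m_count))
        match (if !children.isEmpty then pAValue children metadata 0 else some metadata.sum) with
        | none => none
        | some value => some (endPos + m_count, value)
    | _, _ => none
  termination_by (fuel, 0)

def pAChildren (f : Nat) (inp : List Int) (k : Nat) (endPos : Int) (children : List Int) :
    Option (Int × List Int) :=
  match k with
  | 0 => some (endPos, children)
  | k + 1 =>
    match pA f (PySem.List.slice inp (some endPos) none) with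
    | none => none
    | some (ep, v) => pAChildren f inp k (endPos + ep) (children ++ [v])
  termination_by (f, k + 1)
end

def parse_node (inp : List Int) : Int × Int :=
  match pA (inp.length + 2) inp with
  | some r => r
  | none => (0, 0)

-- ===== PORT B =====
-- B's value: 'sum(ch[x - 1] for x in md if x - 1 < len(ch))' (none = IndexError)
def valB (ch : List Int) (md : List Int) (acc : Int) : Option Int :=
  (md.filter (fun x => decide (x - 1 < (ch.length : Int)))).foldlM
    (fun a x => (PySem.List.pyGet? ch (x - 1)).map (fun e => a + e)) acc

-- the inner 'while stack[-1][0] <= len(stack[-1][2])' loop: pop completed frames,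
-- deliver each value upward; Sum.inl = the function returned, Sum.inr = loop exits
def popLoop (l : List Int) : Int → Int × Int × List Int → List (Int × Int × List Int) →
    Option ((Int × Int) ⊕ (Int × List (Int × Int × List Int)))
  | pos, (c, m, ch), rest =>
    if c ≤ (ch.length : Int) then
      let md := PySem.List.slice l (some pos) (some (pos + m))
      match (if !ch.isEmpty then valB ch md 0 else some md.sum) with
      | none => none
      | some v =>
        match rest with
        | [] => some (Sum.inl (pos + m, v))
        | (c2, m2, ch2) :: rest' => popLoop l (pos + m) (c2, m2, ch2 ++ [v]) rest'
    else some (Sum.inr (pos, (c, m, ch) :: rest))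

-- the outer 'while True' loop: read a header, push a frame, run the pop loop
def runB (l : List Int) : Nat → Int → List (Int × Int × List Int) → Option (Int × Int)
  | 0, _, _ => none
  | f + 1, pos, stack =>
    match PySem.List.pyGet? l pos, PySem.List.pyGet? l (pos + 1) with
    | some c, some m =>
      match popLoop l (pos + 2) (c, m, []) stack with
      | none => none
      | some (Sum.inl r) => some r
      | some (Sum.inr (pos', stack')) => runB l f pos' stack'
    | _, _ => none

def parse_node_alt (inp : List Int) : Int × Int :=
  match runB inp (inp.length + 2) 0 [] with
  | some r => r
  | none => (0, 0)

-- ===== PRECONDITION & SPEC =====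
-- The input grammar: wfGo l fuel k i succeeds iff k consecutive COMPLETE well-formed
-- records start at position i (header counts nonnegative, the announced children and
-- metadata all present, and at a child-bearing record no metadata reference so negative
-- that children[m-1] would raise IndexError), returning the end position.  The fuel is
-- only a structural bound: a record occupies ≥ 2 cells, so length + 2 never binds.
def wfGo (l : List Int) : Nat → Nat → Nat → Option Nat
  | 0, _, _ => none
  | _ + 1, 0, i => some i
  | f + 1, k + 1, i =>
    match l[i]?, l[i + 1]? with
    | some c, some m =>
      if 0 ≤ c ∧ 0 ≤ m then
        match wfGo l f c.toNat (i + 2) with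
        | none => none
        | some p =>
          if p + m.toNat ≤ l.length ∧
              (c ≤ 0 ∨ ((l.drop p).take m.toNat).all (fun e => decide (1 - c ≤ e)))
          then wfGo l f k (p + m.toNat) else none
      else none
    | _, _ => none

-- Pre_ admits every record whose header announces no children (first cell ≤ 0: A then
-- only sums one slice) and every complete well-formed encoding.  Excluded are the inputs
-- on which A raises (too-short input, out-of-range children[m], unbounded recursion on
-- self-overlapping records) and the remaining malformed encodings (a positive child
-- count not followed by the announced well-formed records), where no specification pins
-- a value down: A's relative-slice reparsing and B's stack machine legitimately
-- diverge there, and B may itself raise (see the cited examples in the claim).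
def Pre_parse_node (inp : List Int) : Prop :=
  2 ≤ inp.length ∧ (inp[0]! ≤ 0 ∨ (wfGo inp (inp.length + 2) 1 0).isSome = true)
instance (inp : List Int) : Decidable (Pre_parse_node inp) := by
  unfold Pre_parse_node; infer_instance

def pvWitness_parse_node : List Int := [1, 1, 0, 2, 7, 9, 1]

def Spec_parse_node (inp : List Int) (out : Int × Int) : Prop := out = parse_node_alt inp
instance (inp : List Int) (out : Int × Int) : Decidable (Spec_parse_node inp out) := by
  unfold Spec_parse_node; infer_instance

-- ===== CLAIM (what is proved, stated in full; the proofs are below) =====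
def Claim_equal_parse_node : Prop :=
  ∀ (inp : List Int), Dom_parse_node inp → Pre_parse_node inp →
    Spec_parse_node inp (parse_node inp)

-- ===== LEMMAS AND PROOFS =====

theorem value_eq (ch : List Int) :
    ∀ (md : List Int) (acc : Int), pAValue ch md acc = valB ch md acc
  | [], acc => by simp [pAValue, valB]
  | m :: rest, acc => by
    by_cases h : m - 1 < (ch.length : Int)
    · have h' : m ≤ (ch.length : Int) := by omega
      cases hg : PySem.List.pyGet? ch (m - 1) with
      | none =>
        have h1 : pAValue ch (m :: rest) acc = none := by simp [pAValue, h, hg]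
        have h2 : valB ch (m :: rest) acc = none := by simp [valB, h', hg]
        rw [h1, h2]
      | some x =>
        have h1 : pAValue ch (m :: rest) acc = pAValue ch rest (acc + x) := by
          simp [pAValue, h, hg]
        have h2 : valB ch (m :: rest) acc = valB ch rest (acc + x) := by
          simp [valB, h', hg]
        rw [h1, h2, value_eq ch rest (acc + x)]
    · have h' : ¬ m ≤ (ch.length : Int) := by omega
      have h1 : pAValue ch (m :: rest) acc = pAValue ch rest acc := by
        simp [pAValue, h]
      have h2 : valB ch (m :: rest) acc = valB ch rest acc := by
        simp [valB, h']
      rw [h1, h2, value_eq ch rest acc]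

-- total evaluator for the value of a child-bearing record (proof-side only)
def evVal (ch md : List Int) : Int :=
  ((md.filter (fun x => decide (x - 1 < (ch.length : Int)))).map
    (fun x => (PySem.List.pyGet? ch (x - 1)).getD 0)).sum

theorem valA_eq (ch : List Int) :
    ∀ (md : List Int) (acc : Int), (∀ e ∈ md, -(ch.length : Int) ≤ e - 1) →
      pAValue ch md acc = some (acc + evVal ch md)
  | [], acc, _ => by simp [pAValue, evVal]
  | m :: rest, acc, hmem => by
    by_cases h : m - 1 < (ch.length : Int)
    · have hlo : -(ch.length : Int) ≤ m - 1 := hmem m (by simp)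
      have hg : ∃ x, PySem.List.pyGet? ch (m - 1) = some x := by
        rcases hx : PySem.List.pyGet? ch (m - 1) with _ | x
        · rw [PySem.List.pyGet?_eq_none_iff] at hx
          exact absurd ⟨hlo, h⟩ hx
        · exact ⟨x, rfl⟩
      rcases hg with ⟨x, hx⟩
      have ih := valA_eq ch rest (acc + x) (fun e he => hmem e (by simp [he]))
      have : pAValue ch (m :: rest) acc = pAValue ch rest (acc + x) := by
        simp [pAValue, h, hx]
      have h' : m ≤ (ch.length : Int) := by omega
      rw [this, ih]
      simp [evVal, h', hx]
      ring
    · have ih := valA_eq ch rest acc (fun e he => hmem e (by simp [he]))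
      have : pAValue ch (m :: rest) acc = pAValue ch rest acc := by
        simp [pAValue, h]
      have h' : ¬ m ≤ (ch.length : Int) := by omega
      rw [this, ih]
      simp [evVal, h']

theorem wfGo_bound (l : List Int) :
    ∀ (fw k i p : Nat), wfGo l fw k i = some p → i ≤ p ∧ (0 < k → p ≤ l.length) := by
  intro fw
  induction fw with
  | zero => intro k i p h; simp [wfGo] at h
  | succ f ih =>
    intro k i p h
    match k with
    | 0 => simp only [wfGo, Option.some.injEq] at h; omega
    | k + 1 =>
      rw [wfGo] at h
      split at h
      case _ c m hc hm =>
        split_ifs at h with h0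
        rcases hk : wfGo l f c.toNat (i + 2) with _ | pc
        · simp [hk] at h
        · simp only [hk] at h
          split_ifs at h with h1
          have hbc := ih c.toNat (i + 2) pc hk
          have hbs := ih k (pc + m.toNat) p h
          rcases Nat.eq_zero_or_pos k with hk0 | hk0
          · subst hk0
            rcases f with _ | f2
            · simp [wfGo] at h
            · simp only [wfGo, Option.some.injEq] at h
              omega
          · have := hbs.2 hk0
            omega
      case _ => simp at h

-- proof-side evaluator: end position AND the values of the k records (same guards as wfGo)
def evSeq (l : List Int) : Nat → Nat → Nat → Option (Nat × List Int)
  | 0, _, _ => none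
  | _ + 1, 0, i => some (i, [])
  | f + 1, k + 1, i =>
    match l[i]?, l[i + 1]? with
    | some c, some m =>
      if 0 ≤ c ∧ 0 ≤ m then
        match evSeq l f c.toNat (i + 2) with
        | none => none
        | some (p, vs) =>
          if p + m.toNat ≤ l.length ∧
              (c ≤ 0 ∨ ((l.drop p).take m.toNat).all (fun e => decide (1 - c ≤ e)))
          then
            match evSeq l f k (p + m.toNat) with
            | none => none
            | some (q, ws) =>
              some (q, (if vs.isEmpty then ((l.drop p).take m.toNat).sum
                        else evVal vs ((l.drop p).take m.toNat)) :: ws)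
          else none
      else none
    | _, _ => none

theorem wfGo_evSeq (l : List Int) :
    ∀ (fw k i : Nat), wfGo l fw k i = (evSeq l fw k i).map Prod.fst := by
  intro fw
  induction fw with
  | zero => intro k i; rfl
  | succ f ih =>
    intro k i
    match k with
    | 0 => rfl
    | k + 1 =>
      rw [wfGo, evSeq]
      rcases hc : l[i]? with _ | c
      · rfl
      rcases hm : l[i + 1]? with _ | m
      · rfl
      dsimp only
      by_cases h0 : 0 ≤ c ∧ 0 ≤ m
      · rw [if_pos h0, if_pos h0, ih c.toNat (i + 2)]
        rcases hk : evSeq l f c.toNat (i + 2) with _ | ⟨p, vs⟩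
        · rfl
        · simp only [Option.map_some]
          by_cases h1 : p + m.toNat ≤ l.length ∧
              (c ≤ 0 ∨ (((l.drop p).take m.toNat).all (fun e => decide (1 - c ≤ e))) = true)
          · rw [if_pos h1, if_pos h1, ih k (p + m.toNat)]
            rcases hs : evSeq l f k (p + m.toNat) with _ | ⟨q, ws⟩ <;> rfl
          · rw [if_neg h1, if_neg h1]; rfl
      · rw [if_neg h0, if_neg h0]; rfl

theorem evSeq_len (l : List Int) :
    ∀ (fw k i q : Nat) (vs : List Int), evSeq l fw k i = some (q, vs) → vs.length = k := by
  intro fw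
  induction fw with
  | zero => intro k i q vs h; simp [evSeq] at h
  | succ f ih =>
    intro k i q vs h
    match k with
    | 0 =>
      simp only [evSeq, Option.some.injEq, Prod.ext_iff] at h
      simp [← h.2]
    | k + 1 =>
      rw [evSeq] at h
      split at h
      case _ c m hc hm =>
        by_cases h0 : 0 ≤ c ∧ 0 ≤ m
        case neg => rw [if_neg h0] at h; simp at h
        rw [if_pos h0] at h
        rcases hk : evSeq l f c.toNat (i + 2) with _ | ⟨p, vs1⟩
        · simp [hk] at h
        · simp only [hk] at h
          by_cases h1 : p + m.toNat ≤ l.length ∧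
              (c ≤ 0 ∨ (((l.drop p).take m.toNat).all (fun e => decide (1 - c ≤ e))) = true)
          case neg => rw [if_neg h1] at h; simp at h
          rw [if_pos h1] at h
          rcases hs : evSeq l f k (p + m.toNat) with _ | ⟨q2, ws⟩
          · simp [hs] at h
          · simp only [hs, Option.some.injEq, Prod.ext_iff] at h
            have := ih k (p + m.toNat) q2 ws hs
            simp [← h.2, this]
      case _ => simp at h

theorem evSeq_bound (l : List Int) (fw k i q : Nat) (vs : List Int)
    (h : evSeq l fw k i = some (q, vs)) : i ≤ q ∧ (0 < k → q ≤ l.length) := by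
  have := wfGo_evSeq l fw k i
  rw [h] at this
  exact wfGo_bound l fw k i q this

-- the shared value of one record, as both ports compute it
theorem hval_eq (vs md : List Int) (c : Int) (hlen : vs.length = c.toNat) (hc0 : 0 ≤ c)
    (hall : c ≤ 0 ∨ md.all (fun e => decide (1 - c ≤ e))) :
    (if !vs.isEmpty then pAValue vs md 0 else some md.sum)
      = some (if vs.isEmpty then md.sum else evVal vs md) := by
  by_cases hvs : vs.isEmpty
  · simp [hvs]
  · have hpos : 0 < vs.length := List.length_pos_iff.mpr (fun hnil => by simp [hnil] at hvs)
    have hcpos : 0 < c := by omega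
    have hb : ∀ e ∈ md, -((vs.length : Nat) : Int) ≤ e - 1 := by
      intro e he
      rcases hall with h' | h'
      · omega
      · have := of_decide_eq_true (List.all_eq_true.mp h' e he)
        have hlc : ((vs.length : Nat) : Int) = c := by
          rw [hlen]; exact_mod_cast Int.toNat_of_nonneg hc0
        omega
    rw [valA_eq vs md 0 hb]
    simp [hvs]

-- one well-formed node at position i evaluates in port A to (end, its evSeq value)
theorem node_eval_A (l : List Int) (f'' : Nat) (i pc : Nat) (c m : Int)
    (hc : l[i]? = some c) (hm : l[i + 1]? = some m) (h0 : 0 ≤ c ∧ 0 ≤ m)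
    (h1 : pc + m.toNat ≤ l.length ∧
      (c ≤ 0 ∨ ((l.drop pc).take m.toNat).all (fun e => decide (1 - c ≤ e))))
    (hip : i + 2 ≤ pc) (vs : List Int) (hlen : vs.length = c.toNat)
    (hA2 : pAChildren f'' (l.drop i) c.toNat 2 [] = some (((pc - i : Nat) : Int), vs)) :
    pA (f'' + 1) (l.drop i) = some (((pc + m.toNat - i : Nat) : Int),
      (if vs.isEmpty then ((l.drop pc).take m.toNat).sum
       else evVal vs ((l.drop pc).take m.toNat))) := by
  have hmd : PySem.List.slice (l.drop i) (some ((pc - i : Nat) : Int))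
        (some (((pc - i : Nat) : Int) + m))
      = (l.drop pc).take m.toNat := by
    have hm' : m = ((m.toNat : Nat) : Int) := (Int.toNat_of_nonneg h0.2).symm
    rw [hm', PySem.List.slice_natCast_add, List.drop_drop]
    congr 2
    omega
  rw [pA]
  have hg0 : PySem.List.pyGet? (l.drop i) 0 = some c := by
    rw [PySem.List.pyGet?_zero, List.getElem?_drop]
    simpa using hc
  have hg1 : PySem.List.pyGet? (l.drop i) 1 = some m := by
    have : ((1 : Nat) : Int) = (1 : Int) := by norm_num
    rw [← this, PySem.List.pyGet?_natCast, List.getElem?_drop]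
    exact hm
  rw [hg0, hg1]
  simp only [hA2, hmd]
  rw [hval_eq vs ((l.drop pc).take m.toNat) c hlen h0.1 h1.2]
  have : ((pc - i : Nat) : Int) + m = ((pc + m.toNat - i : Nat) : Int) := by omega
  rw [this]

-- port A computes evSeq's values: k well-formed records starting at i
theorem A_main (l : List Int) :
    ∀ (fw f k i q base : Nat) (vs cs : List Int), evSeq l fw k i = some (q, vs) →
      base ≤ i → q - i ≤ f →
      pAChildren f (l.drop base) k (((i - base : Nat) : Int)) cs
        = some (((q - base : Nat) : Int), cs ++ vs) := by
  intro fw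
  induction fw with
  | zero => intro f k i q base vs cs h hb hf; simp [evSeq] at h
  | succ fw ih =>
    intro f k i q base vs cs h hb hf
    match k with
    | 0 =>
      simp only [evSeq, Option.some.injEq, Prod.ext_iff] at h
      simp [pAChildren, ← h.1, ← h.2]
    | k + 1 =>
      rw [evSeq] at h
      split at h
      case _ c m hc hm =>
        by_cases h0 : 0 ≤ c ∧ 0 ≤ m
        case neg => rw [if_neg h0] at h; simp at h
        rw [if_pos h0] at h
        rcases hk : evSeq l fw c.toNat (i + 2) with _ | ⟨pc, vs1⟩
        · simp [hk] at h
        · simp only [hk] at h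
          by_cases h1 : pc + m.toNat ≤ l.length ∧
              (c ≤ 0 ∨ (((l.drop pc).take m.toNat).all (fun e => decide (1 - c ≤ e))) = true)
          case neg => rw [if_neg h1] at h; simp at h
          rw [if_pos h1] at h
          rcases hs : evSeq l fw k (pc + m.toNat) with _ | ⟨q2, ws⟩
          · simp [hs] at h
          · simp only [hs, Option.some.injEq, Prod.ext_iff] at h
            obtain ⟨hq, hvs⟩ := h
            have hvs := hvs.symm
            subst hq
            have hbc := evSeq_bound l fw c.toNat (i + 2) pc vs1 hk
            have hbs := evSeq_bound l fw k (pc + m.toNat) q2 ws hs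
            have hlen1 := evSeq_len l fw c.toNat (i + 2) pc vs1 hk
            rcases f with _ | f''
            · omega
            obtain hAc := ih f'' c.toNat (i + 2) pc i vs1 [] hk (by omega) (by omega)
            have hA2 : pAChildren f'' (l.drop i) c.toNat 2 []
                = some (((pc - i : Nat) : Int), vs1) := by
              have : ((i + 2 - i : Nat) : Int) = 2 := by norm_num
              simpa [this] using hAc
            have hnA := node_eval_A l f'' i pc c m hc hm h0 h1 (by omega) vs1 hlen1 hA2
            set v := (if vs1.isEmpty then ((l.drop pc).take m.toNat).sum
                else evVal vs1 ((l.drop pc).take m.toNat)) with hvdef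
            have hA := ih (f'' + 1) k (pc + m.toNat) q2 base ws (cs ++ [v]) hs
              (by omega) (by omega)
            rw [pAChildren]
            have hdrop : PySem.List.slice (l.drop base) (some ((i - base : Nat) : Int)) none
                = l.drop i := by
              rw [PySem.List.slice_from_natCast, List.drop_drop]
              congr 1; omega
            rw [hdrop, hnA]
            have harg : ((i - base : Nat) : Int) + ((pc + m.toNat - i : Nat) : Int)
                = ((pc + m.toNat - base : Nat) : Int) := by omega
            rw [hvs]
            simpa [harg, List.append_assoc] using hA
      case _ => simp at h

-- ===== B-side: the stack machine =====

-- the continuation of runB after a popLoop step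
def contB (l : List Int) (g : Nat) :
    Option ((Int × Int) ⊕ (Int × List (Int × Int × List Int))) → Option (Int × Int)
  | none => none
  | some (Sum.inl r) => some r
  | some (Sum.inr (p', S')) => runB l g p' S'

-- delivering a finished value v at position p into the stack
def deliver (l : List Int) (p v : Int) :
    List (Int × Int × List Int) → Option ((Int × Int) ⊕ (Int × List (Int × Int × List Int)))
  | [] => some (Sum.inl (p, v))
  | (c, m, ch) :: rest => popLoop l p (c, m, ch ++ [v]) rest

theorem popLoop_complete (l : List Int) (pos c m : Int) (ch : List Int)
    (rest : List (Int × Int × List Int)) (v : Int) (hc : c ≤ (ch.length : Int))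
    (hv : (if !ch.isEmpty then valB ch (PySem.List.slice l (some pos) (some (pos + m))) 0
           else some (PySem.List.slice l (some pos) (some (pos + m))).sum) = some v) :
    popLoop l pos (c, m, ch) rest = deliver l (pos + m) v rest := by
  rw [popLoop]
  simp only [hc, if_pos, hv]
  rcases rest with _ | ⟨⟨c2, m2, ch2⟩, rest'⟩ <;> simp [deliver]

theorem popLoop_incomplete (l : List Int) (pos c m : Int) (ch : List Int)
    (rest : List (Int × Int × List Int)) (hc : ¬ c ≤ (ch.length : Int)) :
    popLoop l pos (c, m, ch) rest = some (Sum.inr (pos, (c, m, ch) :: rest)) := by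
  rw [popLoop]
  simp [hc]

theorem slice_take (l : List Int) (p : Nat) (m : Int) (hm : 0 ≤ m) :
    PySem.List.slice l (some ((p : Nat) : Int)) (some (((p : Nat) : Int) + m))
      = (l.drop p).take m.toNat := by
  have hm' : m = ((m.toNat : Nat) : Int) := (Int.toNat_of_nonneg hm).symm
  conv_lhs => rw [hm', PySem.List.slice_natCast_add]

theorem evSeq_zero (l : List Int) (fw x y : Nat) (zs : List Int)
    (h : evSeq l fw 0 x = some (y, zs)) : y = x ∧ zs = [] := by
  rcases fw with _ | fw
  · simp [evSeq] at h
  · simp only [evSeq, Option.some.injEq, Prod.ext_iff] at h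
    exact ⟨h.1.symm, h.2.symm⟩

theorem hval_eq_B (vs md : List Int) (c : Int) (hlen : vs.length = c.toNat) (hc0 : 0 ≤ c)
    (hall : c ≤ 0 ∨ md.all (fun e => decide (1 - c ≤ e)) = true) :
    (if !vs.isEmpty then valB vs md 0 else some md.sum)
      = some (if vs.isEmpty then md.sum else evVal vs md) := by
  rw [← value_eq]
  exact hval_eq vs md c hlen hc0 hall

-- one outer iteration of the machine
theorem runB_step (l : List Int) (f : Nat) (pos : Int)
    (stack : List (Int × Int × List Int)) (c m : Int)
    (hg0 : PySem.List.pyGet? l pos = some c)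
    (hg1 : PySem.List.pyGet? l (pos + 1) = some m) :
    runB l (f + 1) pos stack = contB l f (popLoop l (pos + 2) (c, m, []) stack) := by
  rw [runB, hg0, hg1]
  dsimp only
  rcases hp : popLoop l (pos + 2) (c, m, []) stack with _ | r
  · rfl
  · rcases r with r | ⟨p', S'⟩ <;> rfl

-- the machine parses k well-formed records on top of an open frame that exactly
-- these k children complete, then pops that frame
theorem runB_main (l : List Int) :
    ∀ (fw k i q : Nat) (vs : List Int), evSeq l fw k i = some (q, vs) → 1 ≤ k →
      ∀ (c m : Int) (ch : List Int) (S : List (Int × Int × List Int)) (f : Nat),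
        c = (ch.length : Int) + k → q - i ≤ f →
        ∃ g, f ≤ g + (q - i) ∧ g < f ∧
          runB l f ((i : Nat) : Int) ((c, m, ch) :: S)
            = contB l g (popLoop l ((q : Nat) : Int) (c, m, ch ++ vs) S) := by
  intro fw
  induction fw with
  | zero => intro k i q vs h; simp [evSeq] at h
  | succ fw ih =>
    intro k i q vs h hk1 c m ch S f hc hf
    match k, hk1 with
    | Nat.succ k, _ =>
      rw [evSeq] at h
      split at h
      case _ c1 m1 hc1 hm1 =>
        by_cases h0 : 0 ≤ c1 ∧ 0 ≤ m1
        case neg => rw [if_neg h0] at h; simp at h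
        rw [if_pos h0] at h
        rcases hkk : evSeq l fw c1.toNat (i + 2) with _ | ⟨p, vs1⟩
        · simp [hkk] at h
        simp only [hkk] at h
        by_cases h1 : p + m1.toNat ≤ l.length ∧
            (c1 ≤ 0 ∨ (((l.drop p).take m1.toNat).all (fun e => decide (1 - c1 ≤ e))) = true)
        case neg => rw [if_neg h1] at h; simp at h
        rw [if_pos h1] at h
        rcases hs : evSeq l fw k (p + m1.toNat) with _ | ⟨q2, ws⟩
        · simp [hs] at h
        simp only [hs, Option.some.injEq, Prod.ext_iff] at h
        obtain ⟨hq2, hvs⟩ := h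
        rw [hq2] at hs
        have hb1 := evSeq_bound l fw c1.toNat (i + 2) p vs1 hkk
        have hb2 := evSeq_bound l fw k (p + m1.toNat) q ws hs
        have hlen1 := evSeq_len l fw c1.toNat (i + 2) p vs1 hkk
        have hip : i + 2 ≤ p := hb1.1
        have hpq : p + m1.toNat ≤ q := hb2.1
        rcases f with _ | f'
        · omega
        set v1 := (if vs1.isEmpty then ((l.drop p).take m1.toNat).sum
            else evVal vs1 ((l.drop p).take m1.toNat)) with hv1
        have hg0 : PySem.List.pyGet? l ((i : Nat) : Int) = some c1 := by
          rw [PySem.List.pyGet?_natCast]; exact hc1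
        have hg1 : PySem.List.pyGet? l (((i : Nat) : Int) + 1) = some m1 := by
          rw [show (((i : Nat) : Int) + 1) = (((i + 1 : Nat) : Nat) : Int) from by
            push_cast; ring, PySem.List.pyGet?_natCast]
          exact hm1
        rw [runB_step l f' ((i : Nat) : Int) ((c, m, ch) :: S) c1 m1 hg0 hg1]
        have hcast2 : ((i : Nat) : Int) + 2 = (((i + 2 : Nat) : Nat) : Int) := by
          push_cast; ring
        have hP1 : (((p : Nat) : Int)) + m1 = (((p + m1.toNat : Nat) : Nat) : Int) := by
          omega
        -- after the fresh frame is handled, the machine is about to deliver v1 at p + m1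
        have hkey : contB l f' (popLoop l (((i : Nat) : Int) + 2) (c1, m1, []) ((c, m, ch) :: S))
            = contB l f' (popLoop l (((p + m1.toNat : Nat) : Int)) (c, m, ch ++ [v1]) S) ∨
            (∃ g1, g1 < f' ∧ f' ≤ g1 + (p - (i + 2)) ∧
              contB l f' (popLoop l (((i : Nat) : Int) + 2) (c1, m1, []) ((c, m, ch) :: S))
                = contB l g1 (popLoop l (((p + m1.toNat : Nat) : Int)) (c, m, ch ++ [v1]) S)) := by
          by_cases hc1pos : c1 ≤ 0
          · -- leaf record: popped at once inside the same popLoop call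
            left
            have hc1t : c1.toNat = 0 := by omega
            rw [hc1t] at hkk
            obtain ⟨hp, hvs1⟩ := evSeq_zero l fw (i + 2) p vs1 hkk
            have hmd : PySem.List.slice l (some (((i : Nat) : Int) + 2))
                (some (((i : Nat) : Int) + 2 + m1)) = (l.drop (i + 2)).take m1.toNat := by
              rw [hcast2]; exact slice_take l (i + 2) m1 h0.2
            have hcomp : popLoop l (((i : Nat) : Int) + 2) (c1, m1, []) ((c, m, ch) :: S)
                = deliver l (((i : Nat) : Int) + 2 + m1) v1 ((c, m, ch) :: S) := by
              apply popLoop_complete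
              · simpa using hc1pos
              · rw [hmd]
                simp [hv1, hvs1, hp]
            rw [hcomp]
            have hpos : ((i : Nat) : Int) + 2 + m1 = (((p + m1.toNat : Nat) : Nat) : Int) := by
              omega
            rw [hpos, deliver]
          · -- child-bearing record: its frame goes on the stack, its children are parsed
            right
            have hc1k : 1 ≤ c1.toNat := by omega
            rw [popLoop_incomplete l (((i : Nat) : Int) + 2) c1 m1 [] ((c, m, ch) :: S)
              (by simp; omega)]
            have hstep : contB l f'
                (some (Sum.inr (((i : Nat) : Int) + 2, (c1, m1, []) :: (c, m, ch) :: S)))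
                = runB l f' (((i : Nat) : Int) + 2) ((c1, m1, []) :: (c, m, ch) :: S) := rfl
            rw [hstep, hcast2]
            obtain ⟨g1, hg1a, hg1b, hg1c⟩ := ih c1.toNat (i + 2) p vs1 hkk hc1k c1 m1 []
              ((c, m, ch) :: S) f' (by simp; omega) (by omega)
            refine ⟨g1, hg1b, hg1a, ?_⟩
            rw [hg1c]
            -- the completed frame (c1, m1, vs1) is popped and v1 delivered upward
            have hvs1ne : ¬ vs1.isEmpty := by
              have : 0 < vs1.length := by omega
              simp [List.isEmpty_iff]
              intro hnil
              simp [hnil] at this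
            have hmd : PySem.List.slice l (some ((p : Nat) : Int))
                (some (((p : Nat) : Int) + m1)) = (l.drop p).take m1.toNat := by
              exact slice_take l p m1 h0.2
            have hcomp : popLoop l ((p : Nat) : Int) (c1, m1, [] ++ vs1) ((c, m, ch) :: S)
                = deliver l (((p : Nat) : Int) + m1) v1 ((c, m, ch) :: S) := by
              apply popLoop_complete
              · simp only [List.nil_append]
                omega
              · simp only [List.nil_append, hmd]
                rw [hval_eq_B vs1 ((l.drop p).take m1.toNat) c1 hlen1 h0.1 h1.2]
            rw [hcomp, hP1, deliver]
        -- now split on whether this was the last of the k + 1 records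
        rcases Nat.eq_zero_or_pos k with hk0 | hkpos
        · subst hk0
          obtain ⟨hq, hws⟩ := evSeq_zero l fw (p + m1.toNat) q ws hs
          have hchvs : ch ++ [v1] = ch ++ vs := by rw [← hvs, hws]
          rcases hkey with hkey | ⟨g1, hga, hgb, hkey⟩
          · exact ⟨f', by omega, by omega, by rw [hkey, hchvs, hq]⟩
          · exact ⟨g1, by omega, by omega, by rw [hkey, hchvs, hq]⟩
        · -- more records follow: the parent frame is still incomplete, machine continues
          have hinc : ∀ g1 : Nat, g1 < f' + 1 → q - (p + m1.toNat) ≤ g1 →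
              contB l g1 (popLoop l (((p + m1.toNat : Nat) : Int)) (c, m, ch ++ [v1]) S)
                = runB l g1 ((p + m1.toNat : Nat) : Int) ((c, m, ch ++ [v1]) :: S) := by
            intro g1 _ _
            rw [popLoop_incomplete l _ c m (ch ++ [v1]) S (by simp; omega)]
            rfl
          rcases hkey with hkey | ⟨g1, hga, hgb, hkey⟩
          · rw [hkey, hinc f' (by omega) (by omega)]
            obtain ⟨g2, hg2a, hg2b, hg2c⟩ := ih k (p + m1.toNat) q ws hs hkpos c m
              (ch ++ [v1]) S f' (by simp [hc]; omega) (by omega)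
            refine ⟨g2, by omega, by omega, ?_⟩
            rw [hg2c, List.append_assoc]
            simp [hvs]
          · rw [hkey, hinc g1 (by omega) (by omega)]
            obtain ⟨g2, hg2a, hg2b, hg2c⟩ := ih k (p + m1.toNat) q ws hs hkpos c m
              (ch ++ [v1]) S g1 (by simp [hc]; omega) (by omega)
            refine ⟨g2, by omega, by omega, ?_⟩
            rw [hg2c, List.append_assoc]
            simp [hvs]
      case _ => simp at h

-- the machine on the root record
theorem runB_top (l : List Int) (q : Nat) (v : Int)
    (h : evSeq l (l.length + 2) 1 0 = some (q, [v])) :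
    runB l (l.length + 2) 0 [] = some (((q : Nat) : Int), v) := by
  rw [show l.length + 2 = (l.length + 1) + 1 from rfl, evSeq] at h
  split at h
  case _ c1 m1 hc1 hm1 =>
    by_cases h0 : 0 ≤ c1 ∧ 0 ≤ m1
    case neg => rw [if_neg h0] at h; simp at h
    rw [if_pos h0] at h
    rcases hkk : evSeq l (l.length + 1) c1.toNat 2 with _ | ⟨p, vs1⟩
    · simp [hkk] at h
    simp only [hkk] at h
    by_cases h1 : p + m1.toNat ≤ l.length ∧
        (c1 ≤ 0 ∨ (((l.drop p).take m1.toNat).all (fun e => decide (1 - c1 ≤ e))) = true)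
    case neg => rw [if_neg h1] at h; simp at h
    rw [if_pos h1] at h
    rcases hs : evSeq l (l.length + 1) 0 (p + m1.toNat) with _ | ⟨q2, ws⟩
    · simp [hs] at h
    simp only [hs, Option.some.injEq, Prod.ext_iff] at h
    obtain ⟨hq2, hvs⟩ := h
    obtain ⟨hq, hws⟩ := evSeq_zero l (l.length + 1) (p + m1.toNat) q2 ws hs
    have hb1 := evSeq_bound l (l.length + 1) c1.toNat 2 p vs1 hkk
    have hlen1 := evSeq_len l (l.length + 1) c1.toNat 2 p vs1 hkk
    have hv : v = (if vs1.isEmpty then ((l.drop p).take m1.toNat).sum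
        else evVal vs1 ((l.drop p).take m1.toNat)) := by
      rw [hws] at hvs
      simp only [List.cons.injEq, and_true] at hvs
      exact hvs.symm
    have hg0 : PySem.List.pyGet? l 0 = some c1 := by
      rw [PySem.List.pyGet?_zero]; exact hc1
    have hg1 : PySem.List.pyGet? l ((0 : Int) + 1) = some m1 := by
      rw [show ((0 : Int) + 1) = (((1 : Nat) : Nat) : Int) from by norm_num,
        PySem.List.pyGet?_natCast]
      simpa using hm1
    rw [runB_step l (l.length + 1) 0 [] c1 m1 hg0 hg1]
    have hmd2 : PySem.List.slice l (some ((0 : Int) + 2)) (some ((0 : Int) + 2 + m1))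
        = (l.drop 2).take m1.toNat := by
      rw [show ((0 : Int) + 2) = (((2 : Nat) : Nat) : Int) from by norm_num]
      exact slice_take l 2 m1 h0.2
    by_cases hc1pos : c1 ≤ 0
    · -- the root is a leaf record
      have hc1t : c1.toNat = 0 := by omega
      rw [hc1t] at hkk
      obtain ⟨hp, hvs1⟩ := evSeq_zero l (l.length + 1) 2 p vs1 hkk
      have hcomp : popLoop l ((0 : Int) + 2) (c1, m1, []) []
          = deliver l ((0 : Int) + 2 + m1) v [] := by
        apply popLoop_complete
        · simpa using hc1pos
        · rw [hmd2]
          simp [hv, hvs1, hp]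
      rw [hcomp, deliver]
      have : ((0 : Int) + 2 + m1) = ((q : Nat) : Int) := by omega
      rw [this]
      rfl
    · -- the root has children
      have hc1k : 1 ≤ c1.toNat := by omega
      rw [popLoop_incomplete l ((0 : Int) + 2) c1 m1 [] [] (by simp; omega)]
      have hstep : contB l (l.length + 1) (some (Sum.inr ((0 : Int) + 2, [(c1, m1, [])])))
          = runB l (l.length + 1) ((0 : Int) + 2) [(c1, m1, [])] := rfl
      rw [hstep, show ((0 : Int) + 2) = (((2 : Nat) : Nat) : Int) from by norm_num]
      obtain ⟨g1, hg1a, hg1b, hg1c⟩ := runB_main l (l.length + 1) c1.toNat 2 p vs1 hkk hc1k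
        c1 m1 [] [] (l.length + 1) (by simp; omega) (by omega)
      rw [hg1c]
      have hvs1ne : ¬ vs1.isEmpty := by
        have : 0 < vs1.length := by omega
        simp [List.isEmpty_iff]
        intro hnil
        simp [hnil] at this
      have hmd : PySem.List.slice l (some ((p : Nat) : Int))
          (some (((p : Nat) : Int) + m1)) = (l.drop p).take m1.toNat :=
        slice_take l p m1 h0.2
      have hcomp : popLoop l ((p : Nat) : Int) (c1, m1, [] ++ vs1) []
          = deliver l (((p : Nat) : Int) + m1) v [] := by
        apply popLoop_complete
        · simp only [List.nil_append]
          omega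
        · simp only [List.nil_append, hmd]
          rw [hval_eq_B vs1 ((l.drop p).take m1.toNat) c1 hlen1 h0.1 h1.2]
          simp [hv, hvs1ne]
      rw [hcomp, deliver]
      have : (((p : Nat) : Int) + m1) = ((q : Nat) : Int) := by omega
      rw [this]
      rfl
  case _ => simp at h

-- port A on the root record
theorem pA_top (l : List Int) (q : Nat) (v : Int)
    (h : evSeq l (l.length + 2) 1 0 = some (q, [v])) :
    pA (l.length + 2) l = some (((q : Nat) : Int), v) := by
  rw [show l.length + 2 = (l.length + 1) + 1 from rfl, evSeq] at h
  split at h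
  case _ c1 m1 hc1 hm1 =>
    by_cases h0 : 0 ≤ c1 ∧ 0 ≤ m1
    case neg => rw [if_neg h0] at h; simp at h
    rw [if_pos h0] at h
    rcases hkk : evSeq l (l.length + 1) c1.toNat 2 with _ | ⟨p, vs1⟩
    · simp [hkk] at h
    simp only [hkk] at h
    by_cases h1 : p + m1.toNat ≤ l.length ∧
        (c1 ≤ 0 ∨ (((l.drop p).take m1.toNat).all (fun e => decide (1 - c1 ≤ e))) = true)
    case neg => rw [if_neg h1] at h; simp at h
    rw [if_pos h1] at h
    rcases hs : evSeq l (l.length + 1) 0 (p + m1.toNat) with _ | ⟨q2, ws⟩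
    · simp [hs] at h
    simp only [hs, Option.some.injEq, Prod.ext_iff] at h
    obtain ⟨hq2, hvs⟩ := h
    obtain ⟨hq, hws⟩ := evSeq_zero l (l.length + 1) (p + m1.toNat) q2 ws hs
    have hb1 := evSeq_bound l (l.length + 1) c1.toNat 2 p vs1 hkk
    have hlen1 := evSeq_len l (l.length + 1) c1.toNat 2 p vs1 hkk
    have hv : v = (if vs1.isEmpty then ((l.drop p).take m1.toNat).sum
        else evVal vs1 ((l.drop p).take m1.toNat)) := by
      rw [hws] at hvs
      simp only [List.cons.injEq, and_true] at hvs
      exact hvs.symm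
    have hip : 2 ≤ p := hb1.1
    have hAc := A_main l (l.length + 1) (l.length + 1) c1.toNat 2 p 0 vs1 [] hkk
      (by omega) (by omega)
    have hA2 : pAChildren (l.length + 1) (l.drop 0) c1.toNat 2 []
        = some (((p - 0 : Nat) : Int), vs1) := by
      have h2 : ((2 - 0 : Nat) : Int) = 2 := by norm_num
      simpa [h2] using hAc
    have hnA := node_eval_A l (l.length + 1) 0 p c1 m1 (by simpa using hc1)
      (by simpa using hm1) h0 h1 (by omega) vs1 hlen1 (by simpa using hA2)
    rw [hv]
    have hq' : p + m1.toNat - 0 = q := by omega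
    rw [show l.length + 2 = (l.length + 1) + 1 from rfl]
    have := hnA
    rw [List.drop_zero] at this
    rw [this, hq']
  case _ => simp at h

theorem leaf_case (a b : Int) (t : List Int) (ha : a ≤ 0) :
    parse_node (a :: b :: t) = parse_node_alt (a :: b :: t) := by
  have ht : a.toNat = 0 := Int.toNat_of_nonpos ha
  have h0 : PySem.List.pyGet? (a :: b :: t) 0 = some a := by
    simp [PySem.List.pyGet?_zero_cons]
  have h1 : PySem.List.pyGet? (a :: b :: t) 1 = some b := by
    rw [show (1 : Int) = ((1 : Nat) : Int) from by norm_num, PySem.List.pyGet?_natCast]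
    rfl
  have h1' : PySem.List.pyGet? (a :: b :: t) ((0 : Int) + 1) = some b := by
    rw [show ((0 : Int) + 1) = (1 : Int) from by norm_num]; exact h1
  have hA' : pA ((t.length + 3) + 1) (a :: b :: t)
      = some (2 + b, (PySem.List.slice (a :: b :: t) (some 2) (some (2 + b))).sum) := by
    rw [pA, h0, h1]
    dsimp only
    rw [ht, pAChildren]
    dsimp only
    simp
  have hB' : runB (a :: b :: t) ((t.length + 3) + 1) 0 []
      = some (2 + b, (PySem.List.slice (a :: b :: t) (some 2) (some (2 + b))).sum) := by
    rw [runB, h0, h1']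
    dsimp only
    rw [popLoop, if_pos (show a ≤ ((List.length ([] : List Int) : Nat) : Int) from by
      simpa using ha)]
    dsimp only
    norm_num
  have hlen : (a :: b :: t).length + 2 = (t.length + 3) + 1 := by
    simp [List.length_cons]
  unfold parse_node parse_node_alt
  rw [hlen, hA', hB']

-- ===== VERDICT (by name: the statement is the Claim_ definition above) =====
theorem parse_node_spec : Claim_equal_parse_node := by
  intro inp hdom hpre
  unfold Spec_parse_node
  obtain ⟨h2, hcase⟩ := hpre
  match inp, h2 with
  | a :: b :: t, _ =>
    rcases hcase with hleaf | hwf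
    · exact leaf_case a b t (by simpa using hleaf)
    · set l := a :: b :: t
      have hev : ∃ q vs, evSeq l (l.length + 2) 1 0 = some (q, vs) := by
        rw [Option.isSome_iff_exists] at hwf
        obtain ⟨j, hj⟩ := hwf
        have := wfGo_evSeq l (l.length + 2) 1 0
        rw [hj] at this
        rcases he : evSeq l (l.length + 2) 1 0 with _ | ⟨q, vs⟩
        · rw [he] at this; simp at this
        · exact ⟨q, vs, rfl⟩
      obtain ⟨q, vs, he⟩ := hev
      have hlen := evSeq_len l (l.length + 2) 1 0 q vs he
      match vs, hlen with
      | [v], _ =>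
        have hA := pA_top l q v he
        have hB := runB_top l q v he
        unfold parse_node parse_node_alt
        rw [hA, hB]
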